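-- pv_equiv track=rewrite | github.com/FlorenRoosen/bizarroides | bizaroide 2.0.py | allign
-- ===== SOURCE A (Python) =====
-- def delim(code):
--     i = 0
--     x = 0
--     y = 0
--     max_x = 0
--     max_y = 0
--     min_x = 0
--     min_y = 0
--     while i < len(code) - 2:
--         if code[-i] == "0":
--             if i % 2 == 1:
--                 x += i
--             elif i % 2 == 0:
--                 y += -i
--         elif code[-i] == "1":
--             if i % 2 == 1:
--                 x += -i
--             elif i % 2 == 0:
--                 y += i
--
--         if x > max_x:
--             max_x = x
--         if x < min_x:
--             min_x = x
--         if y > max_y: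
--             max_y = y
--         if y < min_y:
--             min_y = y
--         i += 1
--
--     chaine = [max_x, min_x, max_y, min_y]
--     return chaine
--
-- def allign(figures):
--     M_x = 0
--     M_y = 0
--     m_x = 0
--     m_y = 0
--     max_min = []
--     for bizar in figures:
--         max_min = delim(bizar)
--
--         if max_min[0] > M_x:
--             M_x = max_min[0]
--         if max_min[1] < m_x:
--             m_x = max_min[1]
--         if max_min[2] > M_y:
--             M_y = max_min[2]
--         if max_min[3] < m_y:
--             m_y = max_min[3]
--     largeur = M_x - m_x
--     hauteur = M_y - m_y
--     chaine = [hauteur, largeur]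
--     return chaine
-- ===== SOURCE B (Python) =====
-- def _extent(code, parity):
--     # back-to-front composition: after processing index i, (hi, lo) are the
--     # extremes of {0} together with delta(i) + every position reachable later
--     hi = 0
--     lo = 0
--     for i in range(len(code) - 3, -1, -1):
--         if i % 2 != parity:
--             continue
--         c = code[-i]
--         if c == "0":
--             d = i if parity == 1 else -i
--         elif c == "1":
--             d = -i if parity == 1 else i
--         else:
--             continue
--         hi = max(0, d + hi)
--         lo = min(0, d + lo)
--     return hi, lo
--
-- def delim(code):
--     xhi, xlo = _extent(code, 1)
--     yhi, ylo = _extent(code, 0)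
--     return [xhi, xlo, yhi, ylo]
--
-- def allign(figures):
--     if not figures:
--         return [0, 0]
--     boxes = [delim(f) for f in figures]
--     # every box already brackets 0 (hi >= 0 >= lo), so no extra 0 seed is needed
--     return [max(b[2] for b in boxes) - min(b[3] for b in boxes),
--             max(b[0] for b in boxes) - min(b[1] for b in boxes)]
-- ===== Notes on version B (the rewrite author's own statement) =====
-- stated objective: alternative
-- what changed: B computes each figure's box with two independent backward scans (x from the odd indices, y from the even ones) that compose the extremes right-to-left as max(0, d+hi)/min(0, d+lo) instead of A's single forward pass tracking four running extremes of the prefix positions, and allign reduces the per-figure boxes with plain max/min, dropping the 0 seed because every box provably brackets 0.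
import Mathlib
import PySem

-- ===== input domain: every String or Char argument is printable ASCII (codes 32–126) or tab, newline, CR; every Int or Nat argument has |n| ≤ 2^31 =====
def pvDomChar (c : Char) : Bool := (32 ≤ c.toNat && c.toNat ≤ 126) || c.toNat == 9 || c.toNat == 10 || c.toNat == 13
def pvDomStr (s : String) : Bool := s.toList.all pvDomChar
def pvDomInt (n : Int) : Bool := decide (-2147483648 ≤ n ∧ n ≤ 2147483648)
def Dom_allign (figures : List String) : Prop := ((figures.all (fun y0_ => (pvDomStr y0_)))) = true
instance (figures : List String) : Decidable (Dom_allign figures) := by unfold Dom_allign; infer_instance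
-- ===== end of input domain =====

-- B reworks the algorithm: per figure it scans the code BACKWARDS, once per axis (x from the odd
-- indices, y from the even ones), composing the running extremes as max 0 (d + hi) / min 0 (d + lo),
-- and allign reduces the per-figure boxes with plain max/min, dropping the 0 seed because every box
-- already brackets 0 (objective: alternative; same asymptotic cost).

-- ===== PORT A =====
-- loop body of A's delim (one step per i); code[-i] is PySem.List.pyGet? (in range for every
-- executed i, so the comparison with some '0' / some '1' is exact)
def delimStepA (cs : List Char) : (Int × Int × Int × Int × Int × Int) → Int → (Int × Int × Int × Int × Int × Int) :=
  fun (x, y, maxx, minx, maxy, miny) i =>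
    let p : Int × Int :=
      if PySem.List.pyGet? cs (-i) = some '0' then
        if PySem.Int.mod i 2 = 1 then (x + i, y)
        else if PySem.Int.mod i 2 = 0 then (x, y + (-i)) else (x, y)
      else if PySem.List.pyGet? cs (-i) = some '1' then
        if PySem.Int.mod i 2 = 1 then (x + (-i), y)
        else if PySem.Int.mod i 2 = 0 then (x, y + i) else (x, y)
      else (x, y)
    let x := p.1
    let y := p.2
    let maxx := if x > maxx then x else maxx
    let minx := if x < minx then x else minx
    let maxy := if y > maxy then y else maxy
    let miny := if y < miny then y else miny
    (x, y, maxx, minx, maxy, miny)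

def delim (code : String) : List Int :=
  let cs := code.toList
  let s := (PySem.List.pyRange 0 ((cs.length : Int) - 2) 1).foldl (delimStepA cs) (0, 0, 0, 0, 0, 0)
  [s.2.2.1, s.2.2.2.1, s.2.2.2.2.1, s.2.2.2.2.2]

-- loop body of A's allign (state Mx, My, mx, my)
def allignStepA : (Int × Int × Int × Int) → String → (Int × Int × Int × Int) :=
  fun (Mx, My, mx, my) bizar =>
    let mm := delim bizar
    let Mx := if PySem.List.pyGetD mm 0 0 > Mx then PySem.List.pyGetD mm 0 0 else Mx
    let mx := if PySem.List.pyGetD mm 1 0 < mx then PySem.List.pyGetD mm 1 0 else mx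
    let My := if PySem.List.pyGetD mm 2 0 > My then PySem.List.pyGetD mm 2 0 else My
    let my := if PySem.List.pyGetD mm 3 0 < my then PySem.List.pyGetD mm 3 0 else my
    (Mx, My, mx, my)

def allign (figures : List String) : List Int :=
  let s := figures.foldl allignStepA (0, 0, 0, 0)
  [s.2.1 - s.2.2.2, s.1 - s.2.2.1]

-- ===== PORT B =====
-- loop body of B's _extent: backward scan, composing extremes as max 0 (d + hi) / min 0 (d + lo)
def extentStep (cs : List Char) (parity : Int) : (Int × Int) → Int → (Int × Int) :=
  fun (hi, lo) i =>
    if PySem.Int.mod i 2 ≠ parity then (hi, lo)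
    else
      let c := PySem.List.pyGet? cs (-i)
      if c = some '0' then
        let d : Int := if parity = 1 then i else -i
        (max 0 (d + hi), min 0 (d + lo))
      else if c = some '1' then
        let d : Int := if parity = 1 then -i else i
        (max 0 (d + hi), min 0 (d + lo))
      else (hi, lo)

def extent (code : String) (parity : Int) : Int × Int :=
  (PySem.List.pyRange ((code.toList.length : Int) - 3) (-1) (-1)).foldl
    (extentStep code.toList parity) (0, 0)

def delim_alt (code : String) : List Int :=
  let x := extent code 1
  let y := extent code 0
  [x.1, x.2, y.1, y.2]

def allign_alt (figures : List String) : List Int :=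
  if figures = [] then [0, 0]
  else
    let boxes := figures.map delim_alt
    [(PySem.List.max? (boxes.map (fun b => PySem.List.pyGetD b 2 0)) (fun v => v)).getD 0
       - (PySem.List.min? (boxes.map (fun b => PySem.List.pyGetD b 3 0)) (fun v => v)).getD 0,
     (PySem.List.max? (boxes.map (fun b => PySem.List.pyGetD b 0 0)) (fun v => v)).getD 0
       - (PySem.List.min? (boxes.map (fun b => PySem.List.pyGetD b 1 0)) (fun v => v)).getD 0]

-- ===== PRECONDITION & SPEC =====
def Spec_allign (figures : List String) (out : List Int) : Prop := out = allign_alt figures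
instance (figures : List String) (out : List Int) : Decidable (Spec_allign figures out) := by unfold Spec_allign; infer_instance

-- ===== CLAIM (what is proved, stated in full; the proofs are below) =====
def Claim_equal_allign : Prop := ∀ (figures : List String), Dom_allign figures → Spec_allign figures (allign figures)


-- ===== LEMMAS AND PROOFS =====

theorem if_gt_eq_max (m a : Int) : (if a > m then a else m) = max m a := by
  rcases le_total a m with h | h <;> simp [max_def] <;> omega

theorem if_lt_eq_min (m a : Int) : (if a < m then a else m) = min m a := by
  rcases le_total a m with h | h <;> simp [min_def] <;> omega

-- composing one step into the running maximum / minimum of positions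
theorem comp_max (h m d H : Int) (hh : m ≤ h) (hH : 0 ≤ H) :
    max (max h (m + d)) (m + d + H) = max h (m + max 0 (d + H)) := by
  simp only [max_def]; split_ifs <;> omega

theorem comp_min (h m d L : Int) (hh : h ≤ m) (hL : L ≤ 0) :
    min (min h (m + d)) (m + d + L) = min h (m + min 0 (d + L)) := by
  simp only [min_def]; split_ifs <;> omega

-- one B step keeps the extremes bracketing 0
theorem extentStep_bounds (cs : List Char) (parity i : Int) (p : Int × Int)
    (h1 : 0 ≤ p.1) (h2 : p.2 ≤ 0) :
    0 ≤ (extentStep cs parity p i).1 ∧ (extentStep cs parity p i).2 ≤ 0 := by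
  obtain ⟨hi, lo⟩ := p
  simp only [extentStep]
  constructor <;> (split_ifs <;> simp_all)

-- the composed extremes always bracket 0
theorem foldr_extent_bounds (cs : List Char) (parity : Int) (l : List Int) :
    0 ≤ (l.foldr (fun i p => extentStep cs parity p i) ((0 : Int), (0 : Int))).1
    ∧ (l.foldr (fun i p => extentStep cs parity p i) ((0 : Int), (0 : Int))).2 ≤ 0 := by
  induction l with
  | nil => exact ⟨le_refl 0, le_refl 0⟩
  | cons i l ih => exact extentStep_bounds cs parity i _ ih.1 ih.2

-- main invariant: A's forward loop with running extremes equals B's back-to-front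
-- per-axis composition, provided the running extremes bracket the current position
theorem delim_loop_inv (cs : List Char) (l : List Int) :
    ∀ (x y hx lx hy ly : Int), x ≤ hx → lx ≤ x → y ≤ hy → ly ≤ y →
      (l.foldl (delimStepA cs) (x, y, hx, lx, hy, ly)).2.2.1
          = max hx (x + (l.foldr (fun i p => extentStep cs 1 p i) ((0 : Int), (0 : Int))).1)
      ∧ (l.foldl (delimStepA cs) (x, y, hx, lx, hy, ly)).2.2.2.1
          = min lx (x + (l.foldr (fun i p => extentStep cs 1 p i) ((0 : Int), (0 : Int))).2)
      ∧ (l.foldl (delimStepA cs) (x, y, hx, lx, hy, ly)).2.2.2.2.1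
          = max hy (y + (l.foldr (fun i p => extentStep cs 0 p i) ((0 : Int), (0 : Int))).1)
      ∧ (l.foldl (delimStepA cs) (x, y, hx, lx, hy, ly)).2.2.2.2.2
          = min ly (y + (l.foldr (fun i p => extentStep cs 0 p i) ((0 : Int), (0 : Int))).2) := by
  induction l with
  | nil =>
    intro x y hx lx hy ly h1 h2 h3 h4
    simp only [List.foldl_nil, List.foldr_nil, add_zero]
    exact ⟨(max_eq_left h1).symm, (min_eq_left h2).symm,
           (max_eq_left h3).symm, (min_eq_left h4).symm⟩
  | cons i l ih =>
    intro x y hx lx hy ly h1 h2 h3 h4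
    have hbx := foldr_extent_bounds cs 1 l
    have hby := foldr_extent_bounds cs 0 l
    simp only [List.foldl_cons, List.foldr_cons]
    rcases PySem.Int.mod_two_eq i with hm | hm
    · -- even i: only y moves
      have hm' : i % 2 = 0 := by
        rw [← PySem.Int.mod_eq_emod_of_pos (by norm_num : (0 : Int) < 2)]; exact hm
      have hd : (2 : Int) ∣ i := by omega
      have e1 : ∀ p : Int × Int, extentStep cs 1 p i = p := by
        rintro ⟨hi, lo⟩; simp [extentStep, hm']
      by_cases h0 : PySem.List.pyGet? cs (-i) = some '0'
      · have e0 : ∀ p : Int × Int,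
            extentStep cs 0 p i = (max 0 (-i + p.1), min 0 (-i + p.2)) := by
          rintro ⟨hi, lo⟩; simp [extentStep, hm', h0]
        have hst : delimStepA cs (x, y, hx, lx, hy, ly) i
            = (x, y + -i, hx, lx, max hy (y + -i), min ly (y + -i)) := by
          simp [delimStepA, h0, hm', if_gt_eq_max, if_lt_eq_min,
                max_eq_left h1, min_eq_left h2, Prod.ext_iff, max_def, min_def]
          try (split_ifs <;> omega)
        rw [hst, e1, e0]
        obtain ⟨i1, i2, i3, i4⟩ := ih x (y + -i) hx lx (max hy (y + -i)) (min ly (y + -i))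
          h1 h2 (le_max_right _ _) (min_le_right _ _)
        exact ⟨i1, i2,
          by rw [i3]; exact comp_max hy y (-i) _ h3 hby.1,
          by rw [i4]; exact comp_min ly y (-i) _ h4 hby.2⟩
      · by_cases h1' : PySem.List.pyGet? cs (-i) = some '1'
        · have e0 : ∀ p : Int × Int,
              extentStep cs 0 p i = (max 0 (i + p.1), min 0 (i + p.2)) := by
            rintro ⟨hi, lo⟩; simp [extentStep, hm', h1']
          have hst : delimStepA cs (x, y, hx, lx, hy, ly) i
              = (x, y + i, hx, lx, max hy (y + i), min ly (y + i)) := by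
            simp [delimStepA, h1', hm', if_gt_eq_max, if_lt_eq_min,
                  max_eq_left h1, min_eq_left h2, max_def, min_def]
          rw [hst, e1, e0]
          obtain ⟨i1, i2, i3, i4⟩ := ih x (y + i) hx lx (max hy (y + i)) (min ly (y + i))
            h1 h2 (le_max_right _ _) (min_le_right _ _)
          exact ⟨i1, i2,
            by rw [i3]; exact comp_max hy y i _ h3 hby.1,
            by rw [i4]; exact comp_min ly y i _ h4 hby.2⟩
        · have e0 : ∀ p : Int × Int, extentStep cs 0 p i = p := by
            rintro ⟨hi, lo⟩; simp [extentStep, hm', h0, h1']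
          have hst : delimStepA cs (x, y, hx, lx, hy, ly) i
              = (x, y, hx, lx, hy, ly) := by
            simp [delimStepA, h0, h1', if_gt_eq_max, if_lt_eq_min,
                  max_eq_left h1, min_eq_left h2, max_eq_left h3, min_eq_left h4]
          rw [hst, e1, e0]
          exact ih x y hx lx hy ly h1 h2 h3 h4
    · -- odd i: only x moves
      have hm' : i % 2 = 1 := by
        rw [← PySem.Int.mod_eq_emod_of_pos (by norm_num : (0 : Int) < 2)]; exact hm
      have hnd : ¬ (2 : Int) ∣ i := by omega
      have e0 : ∀ p : Int × Int, extentStep cs 0 p i = p := by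
        rintro ⟨hi, lo⟩; simp [extentStep, hm']
      by_cases h0 : PySem.List.pyGet? cs (-i) = some '0'
      · have e1 : ∀ p : Int × Int,
            extentStep cs 1 p i = (max 0 (i + p.1), min 0 (i + p.2)) := by
          rintro ⟨hi, lo⟩; simp [extentStep, hm', h0]
        have hst : delimStepA cs (x, y, hx, lx, hy, ly) i
            = (x + i, y, max hx (x + i), min lx (x + i), hy, ly) := by
          simp [delimStepA, h0, hm', if_gt_eq_max, if_lt_eq_min,
                max_eq_left h3, min_eq_left h4, max_def, min_def]
        rw [hst, e1, e0]
        obtain ⟨i1, i2, i3, i4⟩ := ih (x + i) y (max hx (x + i)) (min lx (x + i)) hy ly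
          (le_max_right _ _) (min_le_right _ _) h3 h4
        exact ⟨by rw [i1]; exact comp_max hx x i _ h1 hbx.1,
          by rw [i2]; exact comp_min lx x i _ h2 hbx.2, i3, i4⟩
      · by_cases h1' : PySem.List.pyGet? cs (-i) = some '1'
        · have e1 : ∀ p : Int × Int,
              extentStep cs 1 p i = (max 0 (-i + p.1), min 0 (-i + p.2)) := by
            rintro ⟨hi, lo⟩; simp [extentStep, hm', h1']
          have hst : delimStepA cs (x, y, hx, lx, hy, ly) i
              = (x + -i, y, max hx (x + -i), min lx (x + -i), hy, ly) := by
            simp [delimStepA, h1', hm', if_gt_eq_max, if_lt_eq_min,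
                  max_eq_left h3, min_eq_left h4, Prod.ext_iff, max_def, min_def]
            try (split_ifs <;> omega)
          rw [hst, e1, e0]
          obtain ⟨i1, i2, i3, i4⟩ := ih (x + -i) y (max hx (x + -i)) (min lx (x + -i)) hy ly
            (le_max_right _ _) (min_le_right _ _) h3 h4
          exact ⟨by rw [i1]; exact comp_max hx x (-i) _ h1 hbx.1,
            by rw [i2]; exact comp_min lx x (-i) _ h2 hbx.2, i3, i4⟩
        · have e1 : ∀ p : Int × Int, extentStep cs 1 p i = p := by
            rintro ⟨hi, lo⟩; simp [extentStep, hm', h0, h1']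
          have hst : delimStepA cs (x, y, hx, lx, hy, ly) i
              = (x, y, hx, lx, hy, ly) := by
            simp [delimStepA, h0, h1', if_gt_eq_max, if_lt_eq_min,
                  max_eq_left h1, min_eq_left h2, max_eq_left h3, min_eq_left h4]
          rw [hst, e1, e0]
          exact ih x y hx lx hy ly h1 h2 h3 h4

-- B's backward foldl over the countdown range is the foldr over A's forward range
theorem extent_eq_foldr (code : String) (parity : Int) :
    extent code parity
      = (PySem.List.pyRange 0 ((code.toList.length : Int) - 2) 1).foldr
          (fun i p => extentStep code.toList parity p i) ((0 : Int), (0 : Int)) := by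
  unfold extent
  rw [PySem.List.pyRange_neg_one_eq_reverse, List.foldl_reverse,
      show ((-1 : Int) + 1) = 0 by ring,
      show ((code.toList.length : Int) - 3 + 1) = ((code.toList.length : Int) - 2) by ring]

theorem delim_eq (code : String) : delim code = delim_alt code := by
  have h := delim_loop_inv code.toList
    (PySem.List.pyRange 0 ((code.toList.length : Int) - 2) 1) 0 0 0 0 0 0
    (le_refl 0) (le_refl 0) (le_refl 0) (le_refl 0)
  have hbx := foldr_extent_bounds code.toList 1
    (PySem.List.pyRange 0 ((code.toList.length : Int) - 2) 1)
  have hby := foldr_extent_bounds code.toList 0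
    (PySem.List.pyRange 0 ((code.toList.length : Int) - 2) 1)
  obtain ⟨h1, h2, h3, h4⟩ := h
  simp only [zero_add, max_eq_right hbx.1, min_eq_right hbx.2,
    max_eq_right hby.1, min_eq_right hby.2] at h1 h2 h3 h4
  simp only [delim, delim_alt, extent_eq_foldr, h1, h2, h3, h4]

-- each component of a B box brackets 0
theorem delim_alt_bounds (s : String) :
    0 ≤ PySem.List.pyGetD (delim_alt s) 0 0 ∧ PySem.List.pyGetD (delim_alt s) 1 0 ≤ 0
    ∧ 0 ≤ PySem.List.pyGetD (delim_alt s) 2 0 ∧ PySem.List.pyGetD (delim_alt s) 3 0 ≤ 0 := by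
  have hbx := foldr_extent_bounds s.toList 1
    (PySem.List.pyRange 0 ((s.toList.length : Int) - 2) 1)
  have hby := foldr_extent_bounds s.toList 0
    (PySem.List.pyRange 0 ((s.toList.length : Int) - 2) 1)
  simp only [String.length_toList] at hbx hby
  simp only [delim_alt, extent_eq_foldr]
  refine ⟨?_, ?_, ?_, ?_⟩ <;>
    simp only [PySem.List.pyGetD, PySem.List.pyGet?, PySem.List.pyIdx?, String.length_toList] <;>
    first | exact hbx.1 | exact hbx.2 | exact hby.1 | exact hby.2

-- A's allign loop = four max/min folds over the mapped per-figure boxes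
theorem allign_loop (l : List String) :
    ∀ (Mx My mx my : Int),
      l.foldl allignStepA (Mx, My, mx, my)
      = ((l.map (fun r => PySem.List.pyGetD (delim r) 0 0)).foldl max Mx,
         (l.map (fun r => PySem.List.pyGetD (delim r) 2 0)).foldl max My,
         (l.map (fun r => PySem.List.pyGetD (delim r) 1 0)).foldl min mx,
         (l.map (fun r => PySem.List.pyGetD (delim r) 3 0)).foldl min my) := by
  induction l with
  | nil => intro Mx My mx my; rfl
  | cons b l ih =>
    intro Mx My mx my
    simp only [List.foldl_cons, List.map_cons]
    rw [show allignStepA (Mx, My, mx, my) b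
        = (max Mx (PySem.List.pyGetD (delim b) 0 0), max My (PySem.List.pyGetD (delim b) 2 0),
           min mx (PySem.List.pyGetD (delim b) 1 0), min my (PySem.List.pyGetD (delim b) 3 0)) from by
          simp [allignStepA, if_gt_eq_max, if_lt_eq_min]]
    exact ih _ _ _ _

-- ===== VERDICT (by name: the statement is the Claim_ definition above) =====
theorem allign_spec : Claim_equal_allign := by
  intro figures _
  unfold Spec_allign
  cases figures with
  | nil => rfl
  | cons g t =>
    obtain ⟨b0, b1, b2, b3⟩ := delim_alt_bounds g
    simp only [allign, allign_alt, if_neg (List.cons_ne_nil g t)]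
    rw [allign_loop]
    simp only [List.map_cons, List.map_map, Function.comp_def, delim_eq,
      PySem.List.max?_id_cons, PySem.List.min?_id_cons, Option.getD_some, List.foldl_cons,
      max_eq_right b0, min_eq_right b1, max_eq_right b2, min_eq_right b3]
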